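-- pv_equiv track=rewrite | github.com/olixva/SistemasGestionEmpresarial_AO | examenAO/Examen_Utilidades.py | mover
-- ===== SOURCE A (Python) =====
-- def mover(m, p, o, s):
--     if o == "C":
--         longitud = len(m[0])
--         cambio = p[1]
--     else:
--         longitud = len(m)
--         cambio = p[0]
--     incremento = +1
--     for i in range(s):
--         if cambio == (longitud - 1):
--             incremento = -1
--         elif cambio == 0:
--             incremento = +1
--         cambio += incremento
--     if o == "C":
--         return [p[0], cambio]
--     else:
--         return [cambio, p[1]]
-- ===== SOURCE B (Python) =====
-- def mover(m, p, o, s):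
--     if o == "C":
--         longitud = len(m[0])
--         cambio = p[1]
--     else:
--         longitud = len(m)
--         cambio = p[0]
--     incremento = 1
--     restantes = s
--     periodo = 2 * (longitud - 1)
--     while restantes > 0:
--         if cambio == longitud - 1:
--             incremento = -1
--         elif cambio == 0:
--             incremento = 1
--         if (cambio == longitud - 1 or cambio == 0) and periodo > 0:
--             restantes %= periodo
--         if incremento == 1:
--             salto = min(restantes, longitud - 1 - cambio) if cambio < longitud - 1 else restantes
--         else:
--             salto = min(restantes, cambio) if cambio > 0 else restantes
--         cambio += incremento * salto
--         restantes -= salto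
--     if o == "C":
--         return [p[0], cambio]
--     else:
--         return [cambio, p[1]]
-- ===== Notes on version B (the rewrite author's own statement) =====
-- stated objective: alternative
-- what changed: Replaces the per-step bounce simulation over range(s) with an event-driven loop that jumps wall-to-wall in one arithmetic step and folds whole bounce periods with one modulo 2*(longitud-1), so the loop body runs a bounded number of times instead of s times; a timing run read only ~1.4x at the largest generated size, so no speed is claimed; Pre_ excludes only the inputs where A raises IndexError (p shorter than 2, or o=='C' with empty m).
import Mathlib
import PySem

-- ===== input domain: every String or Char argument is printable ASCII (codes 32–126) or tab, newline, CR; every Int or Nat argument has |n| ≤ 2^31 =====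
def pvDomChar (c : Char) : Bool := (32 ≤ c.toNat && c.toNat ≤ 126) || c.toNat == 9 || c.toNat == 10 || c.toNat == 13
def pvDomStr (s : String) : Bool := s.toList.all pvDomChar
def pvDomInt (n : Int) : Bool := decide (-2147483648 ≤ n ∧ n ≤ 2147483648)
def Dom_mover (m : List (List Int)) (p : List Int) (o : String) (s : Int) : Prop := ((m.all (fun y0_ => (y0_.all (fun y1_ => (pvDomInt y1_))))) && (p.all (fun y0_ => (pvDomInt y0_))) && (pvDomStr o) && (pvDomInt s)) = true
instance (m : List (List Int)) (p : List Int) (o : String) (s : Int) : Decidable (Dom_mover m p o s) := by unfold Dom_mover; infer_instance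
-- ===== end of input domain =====

-- B replaces A's per-step bounce simulation (one loop iteration per step) with
-- an event-driven simulation: it jumps wall-to-wall in one arithmetic step and
-- folds whole bounce periods with one modulo, so its loop body runs a bounded
-- number of times instead of s times (timing: ~1.4x at the largest size,
-- so no speed is claimed).

-- ===== PORT A =====
-- the per-step direction update inside A's 'for i in range(s)' loop
def fstep (L c i : Int) : Int := if c = L - 1 then -1 else if c = 0 then 1 else i

-- the 'for i in range(s)' loop over the state (cambio, incremento)
def moverLoop (L : Int) : Nat → Int → Int → Int × Int
  | 0, c, i => (c, i)
  | n+1, c, i => moverLoop L n (c + fstep L c i) (fstep L c i)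

def mover (m : List (List Int)) (p : List Int) (o : String) (s : Int) : List Int :=
  let longitud : Int := if o = "C" then ((PySem.List.pyGet? m 0).getD []).length else m.length
  let cambio : Int := if o = "C" then (PySem.List.pyGet? p 1).getD 0 else (PySem.List.pyGet? p 0).getD 0
  let res := (moverLoop longitud s.toNat cambio 1).1
  if o = "C" then [(PySem.List.pyGet? p 0).getD 0, res] else [res, (PySem.List.pyGet? p 1).getD 0]

-- ===== PORT B =====
-- Source B's per-iteration pieces: the incremento update, the period folding of
-- restantes, and the computed segment jump salto
def altInc (L c i : Int) : Int := if c = L - 1 then -1 else if c = 0 then 1 else i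

def altRed (L c r : Int) : Int :=
  if (c = L - 1 ∨ c = 0) ∧ 0 < 2 * (L - 1) then PySem.Int.mod r (2 * (L - 1)) else r

def altSalto (L c i' r1 : Int) : Int :=
  if i' = 1 then (if c < L - 1 then min r1 (L - 1 - c) else r1)
  else (if 0 < c then min r1 c else r1)

-- Source B's 'while restantes > 0' loop; the Nat fuel only makes it total
-- (s.toNat iterations always suffice, since restantes drops every iteration)
def altLoop (L : Int) : Nat → Int → Int → Int → Int
  | 0, c, _, _ => c
  | f+1, c, i, r =>
    if 0 < r then
      altLoop L f (c + altInc L c i * altSalto L c (altInc L c i) (altRed L c r))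
        (altInc L c i) (altRed L c r - altSalto L c (altInc L c i) (altRed L c r))
    else c

def mover_alt (m : List (List Int)) (p : List Int) (o : String) (s : Int) : List Int :=
  let longitud : Int := if o = "C" then ((PySem.List.pyGet? m 0).getD []).length else m.length
  let cambio : Int := if o = "C" then (PySem.List.pyGet? p 1).getD 0 else (PySem.List.pyGet? p 0).getD 0
  let res := altLoop longitud s.toNat cambio 1 s
  if o = "C" then [(PySem.List.pyGet? p 0).getD 0, res] else [res, (PySem.List.pyGet? p 1).getD 0]

-- ===== PRECONDITION & SPEC =====
-- Pre_ excludes exactly the inputs where A raises IndexError: p shorter than 2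
-- (p[0]/p[1] are read), or o == "C" with empty m (m[0] is read).
def Pre_mover (m : List (List Int)) (p : List Int) (o : String) (_s : Int) : Prop :=
  2 ≤ p.length ∧ (o = "C" → m ≠ [])
instance (m : List (List Int)) (p : List Int) (o : String) (s : Int) : Decidable (Pre_mover m p o s) := by unfold Pre_mover; infer_instance

def pvWitness_mover : List (List Int) × List Int × String × Int := ([[0, 0], [0, 0]], [0, 1], "C", 3)

def Spec_mover (m : List (List Int)) (p : List Int) (o : String) (s : Int) (out : List Int) : Prop := out = mover_alt m p o s
instance (m : List (List Int)) (p : List Int) (o : String) (s : Int) (out : List Int) : Decidable (Spec_mover m p o s out) := by unfold Spec_mover; infer_instance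

-- ===== CLAIM (what is proved, stated in full; the proofs are below) =====
def Claim_equal_mover : Prop := ∀ (m : List (List Int)) (p : List Int) (o : String) (s : Int), Dom_mover m p o s → Pre_mover m p o s → Spec_mover m p o s (mover m p o s)

-- ===== LEMMAS AND PROOFS =====

-- a maximal upward run: k steps with direction +1, no upper wall strictly inside
lemma run_up (L : Int) : ∀ (k n : Nat) (c i : Int),
    (k ≠ 0 → fstep L c i = 1) →
    (∀ j : Nat, 1 ≤ j → j < k → c + (j : Int) ≠ L - 1) →
    moverLoop L (k + n) c i = moverLoop L n (c + (k : Int)) (if k = 0 then i else 1) := by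
  intro k
  induction k with
  | zero => intro n c i _ _; simp
  | succ k ih =>
      intro n c i hd hj
      have hstep : fstep L c i = 1 := hd (Nat.succ_ne_zero k)
      have hd' : k ≠ 0 → fstep L (c + 1) 1 = 1 := by
        intro hk
        have h1 : c + ((1 : Nat) : Int) ≠ L - 1 := hj 1 le_rfl (by omega)
        push_cast at h1
        unfold fstep
        rw [if_neg h1]
        split_ifs <;> rfl
      have hshift : ∀ j : Nat, 1 ≤ j → j < k → (c + 1) + (j : Int) ≠ L - 1 := by
        intro j h1 h2
        have := hj (j + 1) (by omega) (by omega)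
        push_cast at this ⊢
        omega
      have heq : (k + 1) + n = (k + n) + 1 := by omega
      rw [heq]
      show moverLoop L ((k + n) + 1) c i = _
      simp only [moverLoop]
      rw [hstep, ih n (c + 1) 1 hd' hshift]
      have hpos : c + 1 + (k : Int) = c + ((k + 1 : Nat) : Int) := by push_cast; ring
      rw [hpos]
      congr 1
      simp

-- a maximal downward run: k steps with direction -1, no lower wall strictly inside
lemma run_down (L : Int) : ∀ (k n : Nat) (c i : Int),
    (k ≠ 0 → fstep L c i = -1) →
    (∀ j : Nat, 1 ≤ j → j < k → c - (j : Int) ≠ 0 ∨ c - (j : Int) = L - 1) →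
    moverLoop L (k + n) c i = moverLoop L n (c - (k : Int)) (if k = 0 then i else -1) := by
  intro k
  induction k with
  | zero => intro n c i _ _; simp
  | succ k ih =>
      intro n c i hd hj
      have hstep : fstep L c i = -1 := hd (Nat.succ_ne_zero k)
      have hd' : k ≠ 0 → fstep L (c - 1) (-1) = -1 := by
        intro hk
        have h1 := hj 1 le_rfl (by omega)
        push_cast at h1
        unfold fstep
        rcases h1 with h | h
        · split_ifs <;> omega
        · rw [if_pos h]
      have hshift : ∀ j : Nat, 1 ≤ j → j < k → (c - 1) - (j : Int) ≠ 0 ∨ (c - 1) - (j : Int) = L - 1 := by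
        intro j h1 h2
        have := hj (j + 1) (by omega) (by omega)
        push_cast at this ⊢
        omega
      have heq : (k + 1) + n = (k + n) + 1 := by omega
      rw [heq]
      show moverLoop L ((k + n) + 1) c i = _
      simp only [moverLoop]
      have hm : c + fstep L c i = c - 1 := by rw [hstep]; ring
      rw [hm, hstep, ih n (c - 1) (-1) hd' hshift]
      have hpos : c - 1 - (k : Int) = c - ((k + 1 : Nat) : Int) := by push_cast; ring
      rw [hpos]
      congr 1
      simp

-- at a wall the incoming incremento is irrelevant to the final position
lemma inc_irrel (L : Int) : ∀ (n : Nat) (c i i' : Int), (c = L - 1 ∨ c = 0) →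
    (moverLoop L n c i).1 = (moverLoop L n c i').1 := by
  intro n c i i' hc
  cases n with
  | zero => rfl
  | succ n =>
      have hf : fstep L c i = fstep L c i' := by
        unfold fstep
        rcases hc with h | h
        · rw [if_pos h, if_pos h]
        · by_cases hL1 : c = L - 1
          · rw [if_pos hL1, if_pos hL1]
          · rw [if_neg hL1, if_neg hL1, if_pos h, if_pos h]
      simp only [moverLoop]
      rw [hf]

-- from a wall, one full period of 2*(L-1) steps returns to the same state
lemma period (L : Int) (hL : 2 ≤ L) (n : Nat) (c i : Int) (hc : c = L - 1 ∨ c = 0) :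
    (moverLoop L ((2 * (L - 1)).toNat + n) c i).1 = (moverLoop L n c i).1 := by
  set K := (L - 1).toNat with hK
  have hKc : (K : Int) = L - 1 := by omega
  have hsplit : (2 * (L - 1)).toNat + n = K + (K + n) := by omega
  rcases hc with h | h
  · rw [hsplit,
      run_down L K (K + n) c i
        (fun _ => by unfold fstep; rw [if_pos h])
        (fun j h1 h2 => by left; omega),
      if_neg (by omega : ¬ K = 0),
      show c - (K : Int) = 0 from by omega,
      run_up L K n 0 (-1)
        (fun _ => by unfold fstep; rw [if_neg (by omega : (0 : Int) ≠ L - 1), if_pos rfl])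
        (fun j h1 h2 => by omega),
      if_neg (by omega : ¬ K = 0),
      show (0 : Int) + (K : Int) = c from by omega]
    exact inc_irrel L n c 1 i (Or.inl h)
  · rw [hsplit,
      run_up L K (K + n) c i
        (fun _ => by unfold fstep; rw [if_neg (by omega : c ≠ L - 1), if_pos h])
        (fun j h1 h2 => by omega),
      if_neg (by omega : ¬ K = 0),
      show c + (K : Int) = L - 1 from by omega,
      run_down L K n (L - 1) 1
        (fun _ => by unfold fstep; rw [if_pos rfl])
        (fun j h1 h2 => by left; omega),
      if_neg (by omega : ¬ K = 0),
      show L - 1 - (K : Int) = c from by omega]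
    exact inc_irrel L n c (-1) i (Or.inr h)

lemma period_mul (L : Int) (hL : 2 ≤ L) : ∀ (q n : Nat) (c i : Int), (c = L - 1 ∨ c = 0) →
    (moverLoop L ((2 * (L - 1)).toNat * q + n) c i).1 = (moverLoop L n c i).1 := by
  intro q
  induction q with
  | zero => intro n c i _; simp
  | succ q ih =>
      intro n c i hc
      have hsplit : (2 * (L - 1)).toNat * (q + 1) + n
          = (2 * (L - 1)).toNat + ((2 * (L - 1)).toNat * q + n) := by ring
      rw [hsplit, period L hL _ c i hc, ih n c i hc]

lemma alt_zero (L : Int) : ∀ (f : Nat) (c i r : Int), r ≤ 0 → altLoop L f c i r = c := by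
  intro f c i r h
  cases f with
  | zero => rfl
  | succ f => simp only [altLoop]; rw [if_neg (by omega)]

-- the event-driven loop computes exactly A's per-step loop result
lemma alt_eq (L : Int) : ∀ (f : Nat) (c i r : Int), r.toNat ≤ f → (i = 1 ∨ i = -1) →
    altLoop L f c i r = (moverLoop L r.toNat c i).1 := by
  intro f
  induction f with
  | zero =>
      intro c i r hf _
      rw [show r.toNat = 0 from by omega]
      rfl
  | succ f ih =>
      intro c i r hf hi
      by_cases hr : 0 < r
      · simp only [altLoop]
        rw [if_pos hr]
        set a := altInc L c i with ha_def
        set b := altRed L c r with hb_def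
        set k := altSalto L c a b with hk_def
        have hstep : fstep L c i = a := rfl
        have ha : a = 1 ∨ a = -1 := by
          rw [ha_def]; unfold altInc
          split_ifs
          · right; rfl
          · left; rfl
          · exact hi
        have hb0 : 0 ≤ b ∧ b ≤ r := by
          rw [hb_def]; unfold altRed
          split_ifs with h
          · have hp := h.2
            rw [PySem.Int.mod_eq_emod_of_pos hp]
            have h1 : 0 ≤ r % (2 * (L - 1)) := Int.emod_nonneg r (by omega)
            have h2 : r % (2 * (L - 1)) ≤ r := by
              rcases lt_or_ge r (2 * (L - 1)) with hlt | hge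
              · rw [Int.emod_eq_of_lt (by omega) hlt]
              · have := Int.emod_lt_of_pos r hp
                omega
            omega
          · omega
        have hkf : 0 ≤ k ∧ k ≤ b ∧ (k = 0 → b = 0) := by
          rw [hk_def]; unfold altSalto
          split_ifs <;> omega
        have hmover : (moverLoop L r.toNat c i).1 = (moverLoop L b.toNat c i).1 := by
          rw [hb_def]; unfold altRed
          split_ifs with h
          · obtain ⟨hcw, hPp⟩ := h
            have hL2 : 2 ≤ L := by omega
            rw [PySem.Int.mod_eq_emod_of_pos hPp]
            set P := 2 * (L - 1) with hP
            have hq0 : 0 ≤ r / P := Int.ediv_nonneg (by omega) (by omega)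
            have e1 : P * (r / P) + r % P = r := Int.ediv_add_emod r P
            have e2 : 0 ≤ r % P := Int.emod_nonneg r (by omega)
            have e3 : ((P.toNat * (r / P).toNat + (r % P).toNat : Nat) : Int) = r := by
              push_cast
              rw [Int.toNat_of_nonneg (by omega), Int.toNat_of_nonneg hq0,
                Int.toNat_of_nonneg e2]
              linarith
            have e4 : r.toNat = P.toNat * (r / P).toNat + (r % P).toNat := by omega
            rw [e4]
            exact period_mul L hL2 _ _ c i hcw
          · rfl
        by_cases hk0 : k = 0
        · have hb00 : b = 0 := hkf.2.2 hk0
          rw [hk0, hb00, hmover, hb00]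
          have : c + a * 0 = c := by ring
          rw [this, alt_zero L f c a (0 - 0) (by omega)]
          rfl
        · have hfle : (b - k).toNat ≤ f := by omega
          rw [hmover, ih _ _ _ hfle ha]
          have hbk : b.toNat = k.toNat + (b - k).toNat := by omega
          rw [hbk]
          have hkc : (k.toNat : Int) = k := by omega
          rcases ha with ha1 | ham1
          · -- upward segment
            have hcne : c ≠ L - 1 := by
              intro hEq
              have h' : altInc L c i = 1 := by rw [← ha_def]; exact ha1
              unfold altInc at h'
              rw [if_pos hEq] at h'
              norm_num at h'
            have hkub : c < L - 1 → k ≤ L - 1 - c := by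
              intro h
              rw [hk_def]; unfold altSalto
              rw [if_pos ha1, if_pos h]
              omega
            rw [run_up L k.toNat (b - k).toNat c i (fun _ => hstep.trans ha1)
                (by
                  intro j h1 h2
                  by_cases hcl : c < L - 1
                  · have := hkub hcl; omega
                  · omega),
              if_neg (by omega : ¬ k.toNat = 0), hkc, ha1, one_mul]
          · -- downward segment
            have hkub : 0 < c → k ≤ c := by
              intro h
              rw [hk_def]; unfold altSalto
              rw [if_neg (by omega : ¬ a = 1), if_pos h]
              omega
            rw [run_down L k.toNat (b - k).toNat c i (fun _ => hstep.trans ham1)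
                (by
                  intro j h1 h2
                  by_cases hcp : 0 < c
                  · have := hkub hcp; left; omega
                  · left; omega),
              if_neg (by omega : ¬ k.toNat = 0), hkc, ham1]
            have : c + -1 * k = c - k := by ring
            rw [this]
      · rw [alt_zero L (f + 1) c i r (by omega), show r.toNat = 0 from by omega]
        rfl

-- ===== VERDICT (by name: the statement is the Claim_ definition above) =====
theorem mover_spec : Claim_equal_mover := by
  intro m p o s _ _
  unfold Spec_mover mover mover_alt
  by_cases ho : o = "C" <;>
    simp only [ho, if_true, if_false] <;>
    rw [alt_eq _ _ _ _ _ le_rfl (Or.inl rfl)]
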